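-- pv_equiv track=rewrite | github.com/samaresh77/09.09.2025 | Python/Projects/Number Pattern/main.py | right_aligned_triangle
-- ===== SOURCE A (Python) =====
-- def right_aligned_triangle(n):
--     pattern = ""
--     for i in range(1, n+1):
--         pattern += " " * (n-i)
--         for j in range(1, i+1):
--             pattern += str(j)
--         pattern += "\n"
--     return pattern
-- ===== SOURCE B (Python) =====
-- def right_aligned_triangle(n):
--     nums = ""
--     rows = []
--     for i in range(1, n + 1):
--         nums += str(i)  # running shared prefix "12...i"
--         rows.append(" " * (n - i) + nums + "\n")
--     return "".join(rows)
-- ===== Notes on version B (the rewrite author's own statement) =====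
-- stated objective: faster
-- what changed: Replaces the nested inner digit loop with a single pass that extends one running prefix string per row and joins the collected rows once.
import Mathlib
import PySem

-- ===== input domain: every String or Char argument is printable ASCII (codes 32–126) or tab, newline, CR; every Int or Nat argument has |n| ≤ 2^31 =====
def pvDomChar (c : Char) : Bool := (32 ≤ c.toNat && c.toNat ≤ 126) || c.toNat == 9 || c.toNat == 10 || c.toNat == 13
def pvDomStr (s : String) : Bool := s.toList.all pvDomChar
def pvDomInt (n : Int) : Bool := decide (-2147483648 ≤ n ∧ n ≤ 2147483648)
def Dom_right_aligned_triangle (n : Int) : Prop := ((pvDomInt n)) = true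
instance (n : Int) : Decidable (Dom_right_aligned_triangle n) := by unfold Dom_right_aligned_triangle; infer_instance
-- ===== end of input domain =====

-- B builds each row by extending one running digit-prefix string instead of A's nested inner loop (single pass, rows joined once).
-- Both ports work over List Char (PySem's string representation) and wrap with String.ofList at the end.

-- ===== PORT A =====
def right_aligned_triangle (n : Int) : String :=
  String.ofList ((PySem.List.pyRange 1 (n + 1) 1).foldl
    (fun pattern i =>
      ((PySem.List.pyRange 1 (i + 1) 1).foldl
        (fun p j => p ++ PySem.Int.toChars j)
        (pattern ++ PySem.List.pyRepeat [' '] (n - i))) ++ ['\n'])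
    [])

-- ===== PORT B =====
def right_aligned_triangle_alt (n : Int) : String :=
  String.ofList (((PySem.List.pyRange 1 (n + 1) 1).foldl
    (fun (st : List Char × List (List Char)) i =>
      (st.1 ++ PySem.Int.toChars i,
        st.2 ++ [PySem.List.pyRepeat [' '] (n - i) ++ (st.1 ++ PySem.Int.toChars i) ++ ['\n']]))
    ([], [])).2.flatten)

-- ===== PRECONDITION & SPEC =====
def Spec_right_aligned_triangle (n : Int) (out : String) : Prop := out = right_aligned_triangle_alt n
instance (n : Int) (out : String) : Decidable (Spec_right_aligned_triangle n out) := by unfold Spec_right_aligned_triangle; infer_instance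

-- ===== CLAIM (what is proved, stated in full; the proofs are below) =====
def Claim_equal_right_aligned_triangle : Prop := ∀ (n : Int), Dom_right_aligned_triangle n → Spec_right_aligned_triangle n (right_aligned_triangle n)

-- ===== LEMMAS AND PROOFS =====

-- the running prefix "12...(a-1)" after having processed rows 1..a-1
def pvNumsUpTo (a : Int) : List Char :=
  (PySem.List.pyRange 1 a 1).foldl (fun p j => p ++ PySem.Int.toChars j) []

lemma pv_foldl_append (l : List Int) (q : List Char) :
    l.foldl (fun p j => p ++ PySem.Int.toChars j) q
      = q ++ l.foldl (fun p j => p ++ PySem.Int.toChars j) [] := by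
  induction l generalizing q with
  | nil => simp
  | cons x xs ih =>
      simp only [List.foldl_cons, List.nil_append]
      rw [ih (q ++ PySem.Int.toChars x), ih (PySem.Int.toChars x)]
      simp

lemma pvNumsUpTo_succ (a : Int) (ha : 1 ≤ a) :
    pvNumsUpTo (a + 1) = pvNumsUpTo a ++ PySem.Int.toChars a := by
  unfold pvNumsUpTo
  rw [PySem.List.pyRange_one_succ_right ha, List.foldl_append]
  simp

lemma pv_main (n : Int) (m : Nat) : ∀ (a : Int), 1 ≤ a → ∀ (acc : List (List Char)),
    (((PySem.List.pyRange a (a + m) 1).foldl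
      (fun (st : List Char × List (List Char)) i =>
        (st.1 ++ PySem.Int.toChars i,
          st.2 ++ [PySem.List.pyRepeat [' '] (n - i) ++ (st.1 ++ PySem.Int.toChars i) ++ ['\n']]))
      (pvNumsUpTo a, acc)).2).flatten
    = (PySem.List.pyRange a (a + m) 1).foldl
      (fun pattern i =>
        ((PySem.List.pyRange 1 (i + 1) 1).foldl
          (fun p j => p ++ PySem.Int.toChars j)
          (pattern ++ PySem.List.pyRepeat [' '] (n - i))) ++ ['\n'])
      acc.flatten := by
  induction m with
  | zero =>
      intro a ha acc
      rw [PySem.List.pyRange_one_eq_nil (by omega)]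
      simp
  | succ k ih =>
      intro a ha acc
      rw [PySem.List.pyRange_one_cons (by omega : a < a + (k + 1 : Nat))]
      simp only [List.foldl_cons]
      have hrange : (a + 1) + (k : Int) = a + ((k + 1 : Nat) : Int) := by push_cast; ring
      have := ih (a + 1) (by omega)
        (acc ++ [PySem.List.pyRepeat [' '] (n - a) ++ (pvNumsUpTo a ++ PySem.Int.toChars a) ++ ['\n']])
      rw [hrange] at this
      rw [pvNumsUpTo_succ a ha] at this
      rw [this]
      congr 1
      rw [pv_foldl_append, ← pvNumsUpTo, pvNumsUpTo_succ a ha]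
      simp

-- ===== VERDICT (by name: the statement is the Claim_ definition above) =====
theorem right_aligned_triangle_spec : Claim_equal_right_aligned_triangle := by
  intro n _
  unfold Spec_right_aligned_triangle right_aligned_triangle right_aligned_triangle_alt
  by_cases h : n ≤ 0
  · rw [PySem.List.pyRange_one_eq_nil (by omega)]
    simp
  · have h1 : (1 : Int) ≤ n := by omega
    have hn : n + 1 = 1 + (n.toNat : Int) := by omega
    have hmain := pv_main n n.toNat 1 le_rfl []
    have hnums : pvNumsUpTo 1 = [] := by
      unfold pvNumsUpTo
      rw [PySem.List.pyRange_one_eq_nil le_rfl]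
      simp
    rw [hnums] at hmain
    simp only [List.flatten_nil] at hmain
    rw [hn, hmain]
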